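-- pv_equiv track=rewrite | github.com/Sidreyas/SOC_Agents | agents/phishing_agent/threat_intelligence_correlator.py | _map_to_attack_phases
-- ===== SOURCE A (Python) =====
-- from typing import Dict, Any, List, Optional, Set, Tuple
--
-- def _map_to_attack_phases(ttps: List[Dict[str, Any]]) -> Dict[str, List[str]]:
--     """Map TTPs to attack lifecycle phases"""
--     phase_mapping = {
--         "reconnaissance": [],
--         "initial_access": [],
--         "execution": [],
--         "persistence": [],
--         "privilege_escalation": [],
--         "defense_evasion": [],
--         "credential_access": [],
--         "discovery": [],
--         "lateral_movement": [],
--         "collection": [],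
--         "command_and_control": [],
--         "exfiltration": [],
--         "impact": []
--     }
--
--     # MITRE ATT&CK technique to phase mapping
--     technique_phases = {
--         "T1566": "initial_access",
--         "T1566.001": "initial_access",
--         "T1566.002": "initial_access",
--         "T1598": "reconnaissance",
--         "T1204": "execution",
--         "T1059": "execution",
--         "T1071": "command_and_control",
--         "T1041": "exfiltration"
--     }
--
--     for ttp in ttps:
--         technique_id = ttp.get("technique_id", "")
--         if technique_id in technique_phases:
--             phase = technique_phases[technique_id]
--             phase_mapping[phase].append(technique_id)
--
--     return phase_mapping
-- ===== SOURCE B (Python) =====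
-- def _map_to_attack_phases(ttps):
--     """Map TTPs to attack lifecycle phases"""
--     phase_names = [
--         "reconnaissance", "initial_access", "execution", "persistence",
--         "privilege_escalation", "defense_evasion", "credential_access",
--         "discovery", "lateral_movement", "collection",
--         "command_and_control", "exfiltration", "impact",
--     ]
--     technique_phases = {
--         "T1566": "initial_access",
--         "T1566.001": "initial_access",
--         "T1566.002": "initial_access",
--         "T1598": "reconnaissance",
--         "T1204": "execution",
--         "T1059": "execution",
--         "T1071": "command_and_control",
--         "T1041": "exfiltration",
--     }
--     return {phase: [t.get("technique_id", "") for t in ttps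
--                     if technique_phases.get(t.get("technique_id", "")) == phase]
--             for phase in phase_names}
-- ===== Notes on version B (the rewrite author's own statement) =====
-- stated objective: alternative
-- what changed: Replaces the single forward pass that appends into a pre-built phase dict with a dict comprehension over the 13 phase names, each phase rescanning ttps and collecting the technique ids mapped to it.
import Mathlib
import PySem

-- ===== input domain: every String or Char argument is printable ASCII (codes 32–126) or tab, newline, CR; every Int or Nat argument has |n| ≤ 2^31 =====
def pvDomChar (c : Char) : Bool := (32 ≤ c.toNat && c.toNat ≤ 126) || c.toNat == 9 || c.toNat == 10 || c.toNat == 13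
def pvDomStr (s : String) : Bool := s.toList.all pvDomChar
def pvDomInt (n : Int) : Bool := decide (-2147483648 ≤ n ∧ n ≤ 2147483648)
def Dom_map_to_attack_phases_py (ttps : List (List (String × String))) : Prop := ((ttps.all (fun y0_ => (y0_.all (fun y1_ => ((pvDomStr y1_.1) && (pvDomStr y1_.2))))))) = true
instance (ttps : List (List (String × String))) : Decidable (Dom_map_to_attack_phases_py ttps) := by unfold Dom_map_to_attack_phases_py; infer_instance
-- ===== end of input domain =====

-- B rebuilds the result as a comprehension over the 13 phase names, rescanning ttps per phase,
-- instead of A's single forward pass appending into a pre-built phase dict (objective: alternative).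


-- ===== PORT A =====
-- ttp.get("technique_id", "") on the assoc-list encoding of a Python dict: first match.
def pvGetTid (ttp : List (String × String)) : String :=
  ((ttp.lookup "technique_id").getD "")

-- the MITRE technique → phase table (same constant in A and B, as in the Pythons)
def pvTechniquePhases : PySem.Dict String String :=
  PySem.Dict.ofList
    [("T1566", "initial_access"), ("T1566.001", "initial_access"),
     ("T1566.002", "initial_access"), ("T1598", "reconnaissance"),
     ("T1204", "execution"), ("T1059", "execution"),
     ("T1071", "command_and_control"), ("T1041", "exfiltration")]

def pvPhaseInit : PySem.Dict String (List String) :=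
  PySem.Dict.ofList
    [("reconnaissance", []), ("initial_access", []), ("execution", []),
     ("persistence", []), ("privilege_escalation", []), ("defense_evasion", []),
     ("credential_access", []), ("discovery", []), ("lateral_movement", []),
     ("collection", []), ("command_and_control", []), ("exfiltration", []),
     ("impact", [])]

def map_to_attack_phases_py (ttps : List (List (String × String))) : List (String × List String) :=
  (ttps.foldl
    (fun acc ttp =>
      let technique_id := pvGetTid ttp
      if pvTechniquePhases.contains technique_id then
        -- phase_mapping[phase].append(technique_id); phase is always a pre-seeded key
        acc.modify (pvTechniquePhases.getD technique_id "") [] (fun v => v ++ [technique_id])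
      else acc)
    pvPhaseInit).items

-- ===== PORT B =====
def pvPhaseNames : List String :=
  ["reconnaissance", "initial_access", "execution", "persistence",
   "privilege_escalation", "defense_evasion", "credential_access",
   "discovery", "lateral_movement", "collection",
   "command_and_control", "exfiltration", "impact"]

def map_to_attack_phases_py_alt (ttps : List (List (String × String))) : List (String × List String) :=
  pvPhaseNames.map (fun phase =>
    (phase, ttps.filterMap (fun t =>
      if pvTechniquePhases.get? (pvGetTid t) = some phase then some (pvGetTid t) else none)))

-- ===== PRECONDITION & SPEC =====
def Spec_map_to_attack_phases_py (ttps : List (List (String × String))) (out : List (String × List String)) : Prop := out = map_to_attack_phases_py_alt ttps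
instance (ttps : List (List (String × String))) (out : List (String × List String)) : Decidable (Spec_map_to_attack_phases_py ttps out) := by unfold Spec_map_to_attack_phases_py; infer_instance

-- ===== CLAIM (what is proved, stated in full; the proofs are below) =====
def Claim_equal_map_to_attack_phases_py : Prop := ∀ (ttps : List (List (String × String))), Dom_map_to_attack_phases_py ttps → Spec_map_to_attack_phases_py ttps (map_to_attack_phases_py ttps)

-- ===== LEMMAS AND PROOFS =====

-- the step function of A's loop
def pvStepA (acc : PySem.Dict String (List String)) (ttp : List (String × String)) : PySem.Dict String (List String) :=
  if pvTechniquePhases.contains (pvGetTid ttp) then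
    acc.modify (pvTechniquePhases.getD (pvGetTid ttp) "") [] (fun v => v ++ [pvGetTid ttp])
  else acc

-- a contained key's getD is what get? returns
lemma pvGet?_of_contains {κ ν : Type} [BEq κ] [LawfulBEq κ] (d : PySem.Dict κ ν) (k : κ) (dflt : ν)
    (h : d.contains k = true) : d.get? k = some (d.getD k dflt) := by
  cases hg : d.get? k
  · rw [PySem.Dict.get?_eq_none_iff_contains] at hg; simp [h] at hg
  · simp [PySem.Dict.getD_eq_get?_getD, hg]

-- a value returned by get? is among the dict's values
lemma pvGet?_mem_values {κ ν : Type} [BEq κ] [LawfulBEq κ] (d : PySem.Dict κ ν) (k : κ) (v : ν)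
    (h : d.get? k = some v) : v ∈ d.values := by
  unfold PySem.Dict.get? PySem.Dict.values at *
  cases hf : List.find? (fun p => p.1 == k) d.items with
  | none => simp [hf] at h
  | some p =>
    simp only [hf, Option.map_some, Option.some.injEq] at h
    exact h ▸ List.mem_map_of_mem (List.mem_of_find?_eq_some hf)

-- the phase written by A's step is always one of the 13 pre-seeded keys
lemma pvPhase_mem (tid : String) (h : pvTechniquePhases.contains tid = true) :
    pvTechniquePhases.getD tid "" ∈ pvPhaseInit.keys := by
  have hv := pvGet?_mem_values pvTechniquePhases tid _ (pvGet?_of_contains pvTechniquePhases tid "" h)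
  have hall : ∀ s ∈ pvTechniquePhases.values, s ∈ pvPhaseInit.keys := by decide
  exact hall _ hv

lemma pvKeys_stepA (acc : PySem.Dict String (List String)) (t : List (String × String))
    (hk : acc.keys = pvPhaseInit.keys) : (pvStepA acc t).keys = acc.keys := by
  unfold pvStepA
  split
  · next hc =>
    rw [PySem.Dict.keys_modify, PySem.Dict.keys_insert_of_contains]
    rw [PySem.Dict.contains_iff_mem_keys, hk]
    exact pvPhase_mem _ hc
  · rfl

lemma pvKeys_loop (l : List (List (String × String))) (acc : PySem.Dict String (List String))
    (hk : acc.keys = pvPhaseInit.keys) : (l.foldl pvStepA acc).keys = acc.keys := by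
  induction l generalizing acc with
  | nil => rfl
  | cons t l ih =>
    simp only [List.foldl_cons]
    rw [ih _ (by rw [pvKeys_stepA acc t hk, hk]), pvKeys_stepA acc t hk]

lemma pvGetD_loop (p : String) (l : List (List (String × String))) (acc : PySem.Dict String (List String)) :
    (l.foldl pvStepA acc).getD p [] =
      acc.getD p [] ++ l.filterMap (fun t =>
        if pvTechniquePhases.get? (pvGetTid t) = some p then some (pvGetTid t) else none) := by
  induction l generalizing acc with
  | nil => simp
  | cons t l ih =>
    simp only [List.foldl_cons, List.filterMap_cons]
    rw [ih]
    unfold pvStepA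
    by_cases hc : pvTechniquePhases.contains (pvGetTid t)
    · have hget : pvTechniquePhases.get? (pvGetTid t) =
          some (pvTechniquePhases.getD (pvGetTid t) "") :=
        pvGet?_of_contains _ _ _ hc
      simp only [hc, if_true, hget]
      rw [PySem.Dict.getD_modify]
      by_cases hp : p = pvTechniquePhases.getD (pvGetTid t) ""
      · subst hp; simp
      · have h2 : ¬ (some (pvTechniquePhases.getD (pvGetTid t) "") = some p) := by
          simp [Ne.symm hp]
        simp [hp, h2]
    · have hget : pvTechniquePhases.get? (pvGetTid t) = none := by
        rw [PySem.Dict.get?_eq_none_iff_contains]; simpa using hc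
      simp [hc, hget]

-- ===== VERDICT (by name: the statement is the Claim_ definition above) =====
theorem map_to_attack_phases_py_spec : Claim_equal_map_to_attack_phases_py := by
  intro ttps _
  unfold Spec_map_to_attack_phases_py map_to_attack_phases_py map_to_attack_phases_py_alt
  show (ttps.foldl pvStepA pvPhaseInit).items = _
  have hkinit : pvPhaseInit.keys = pvPhaseNames := by decide
  have hkeys : (ttps.foldl pvStepA pvPhaseInit).keys = pvPhaseNames := by
    rw [pvKeys_loop ttps pvPhaseInit rfl, hkinit]
  have hnodup : (ttps.foldl pvStepA pvPhaseInit).keys.Nodup := by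
    rw [hkeys]; decide
  rw [PySem.Dict.items_eq_map_keys _ hnodup ([] : List String), hkeys]
  apply List.map_congr_left
  intro p hp
  rw [pvGetD_loop]
  have hinit : pvPhaseInit.getD p [] = [] := by
    have : ∀ q ∈ pvPhaseNames, pvPhaseInit.getD q [] = [] := by decide
    exact this p hp
  rw [hinit, List.nil_append]
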